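-- pv_equiv track=rewrite | github.com/hiromitsuiwata/trace-flamegraph | graph/create_fold.py | group_by_thread
-- ===== SOURCE A (Python) =====
-- def group_by_thread(events):
--     """TraceAdviceのログをスレッドごとにグループ化する"""
--     thread_dict = {}
--     for event in events:
--         parts = event.split(' ')
--         thread_id = parts[1]
--         if thread_id in thread_dict:
--             thread_dict[thread_id].append(event)
--         else:
--             thread_dict[thread_id] = [event]
--     return thread_dict
-- ===== SOURCE B (Python) =====
-- def group_by_thread(events):
--     """TraceAdviceのログをスレッドごとにグループ化する"""
--     keys = []
--     for event in events:
--         k = event.split(' ')[1]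
--         if k not in keys:
--             keys.append(k)
--     return {k: [e for e in events if e.split(' ')[1] == k] for k in keys}
-- ===== Notes on version B (the rewrite author's own statement) =====
-- stated objective: alternative
-- what changed: B replaces A's single-pass incremental dict accumulation (lookup-then-append-or-insert per event) by a two-pass scheme: first collect the distinct thread ids in first-occurrence order, then build each group as a filter of the whole event list.
import Mathlib
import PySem

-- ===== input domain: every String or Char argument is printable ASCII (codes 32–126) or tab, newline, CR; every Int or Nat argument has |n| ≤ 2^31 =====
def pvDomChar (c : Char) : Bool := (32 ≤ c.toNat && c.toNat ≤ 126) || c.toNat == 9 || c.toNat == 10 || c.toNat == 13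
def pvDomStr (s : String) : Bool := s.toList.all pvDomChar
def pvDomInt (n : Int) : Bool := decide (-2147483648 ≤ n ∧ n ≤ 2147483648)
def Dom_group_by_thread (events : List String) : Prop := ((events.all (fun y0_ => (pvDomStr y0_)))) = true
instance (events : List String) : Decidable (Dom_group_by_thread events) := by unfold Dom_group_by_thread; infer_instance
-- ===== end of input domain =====

-- B replaces A's incremental dict accumulation by a two-pass scheme: collect the distinct
-- thread ids in first-occurrence order, then build each group by filtering the event list.

-- ===== PORT A =====
-- event.split(' ')[1] — the key expression both Pythons share verbatim; .getD only
-- defaults where Python raises (excluded by Pre_)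
def keyOf (e : String) : String :=
  (PySem.List.pyGet? ((PySem.Str.split? e " ").getD []) 1).getD ""

def group_by_thread (events : List String) : List (String × List String) :=
  (events.foldl
    (fun thread_dict event =>
      let thread_id := keyOf event
      if thread_dict.contains thread_id then
        thread_dict.modify thread_id [] (fun l => l ++ [event])
      else
        thread_dict.insert thread_id [event])
    PySem.Dict.empty).items

-- ===== PORT B =====
def group_by_thread_alt (events : List String) : List (String × List String) :=
  let keys : PySem.Set String :=
    events.foldl (fun ks event => PySem.Set.add ks (keyOf event)) PySem.Set.empty
  keys.map (fun k => (k, events.filter (fun e => keyOf e == k)))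

-- ===== PRECONDITION & SPEC =====
-- Pre_ excludes events without a space: there event.split(' ') has fewer than 2 parts and
-- Python A raises IndexError (B raises there too).
def Pre_group_by_thread (events : List String) : Prop :=
  ∀ e ∈ events, 2 ≤ ((PySem.Str.split? e " ").getD []).length
instance (events : List String) : Decidable (Pre_group_by_thread events) := by
  unfold Pre_group_by_thread; infer_instance
def pvWitness_group_by_thread : List String := ["a t1 x", "b t2 y", "c t1 z"]
def Spec_group_by_thread (events : List String) (out : List (String × List String)) : Prop := out = group_by_thread_alt events
instance (events : List String) (out : List (String × List String)) : Decidable (Spec_group_by_thread events out) := by unfold Spec_group_by_thread; infer_instance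

-- ===== CLAIM =====
def Claim_equal_group_by_thread : Prop := ∀ (events : List String), Dom_group_by_thread events → Pre_group_by_thread events → Spec_group_by_thread events (group_by_thread events)

-- ===== LEMMAS AND PROOFS =====
-- A's if/else branch pair is one Dict.modify step
theorem step_eq_modify (d : PySem.Dict String (List String)) (k e : String) :
    (if d.contains k then d.modify k [] (fun l => l ++ [e]) else d.insert k [e])
      = d.modify k [] (fun l => l ++ [e]) := by
  by_cases h : d.contains k <;>
    simp [h, PySem.Dict.modify, PySem.Dict.insert, PySem.Dict.getD_of_not_contains]

theorem ports_agree (events : List String) :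
    group_by_thread events = group_by_thread_alt events := by
  unfold group_by_thread group_by_thread_alt
  have hfold :
      events.foldl
        (fun thread_dict event =>
          let thread_id := keyOf event
          if thread_dict.contains thread_id then
            thread_dict.modify thread_id [] (fun l => l ++ [event])
          else
            thread_dict.insert thread_id [event])
        PySem.Dict.empty
      = events.foldl
          (fun d e => d.modify (keyOf e) [] (fun l => l ++ [e])) PySem.Dict.empty :=
    PySem.List.foldl_congr_mem _ _ _ _ (fun d e _ => step_eq_modify d (keyOf e) e)
  rw [hfold]
  have hnd := PySem.Dict.nodup_keys_foldl_modify_key events keyOf []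
    (fun _ e l => l ++ [e]) PySem.Dict.empty (by simp)
  rw [PySem.Dict.items_eq_map_keys _ hnd []]
  rw [PySem.Dict.keys_foldl_modify_key events keyOf [] (fun _ e l => l ++ [e])]
  rw [show PySem.Dict.empty.keys = PySem.Set.empty from by simp [PySem.Set.empty],
      ← PySem.Set.update_map_eq_foldl_add]
  apply List.map_congr_left
  intro k hk
  have hpairs :
      events.foldl (fun d e => d.modify (keyOf e) [] (fun l => l ++ [e])) PySem.Dict.empty
      = (events.map (fun e => (keyOf e, e))).foldl
          (fun d p => d.modify p.1 [] (fun l => l ++ [p.2])) PySem.Dict.empty := by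
    rw [List.foldl_map]
  rw [hpairs, PySem.Dict.getD_foldl_modify_append]
  simp [List.filter_map, List.map_map, Function.comp_def]

-- ===== VERDICT =====
theorem group_by_thread_spec : Claim_equal_group_by_thread := by
  intro events _ _
  unfold Spec_group_by_thread
  exact ports_agree events
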